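-- pv_equiv track=rewrite | github.com/SidhaarthShree07/txt-to-ppt-generator | src/ppt_analyzer.py | get_best_layout_for_slide_type
-- ===== SOURCE A (Python) =====
-- from typing import Dict, List, Any, Tuple, Optional
--
-- def get_best_layout_for_slide_type(template_info: Dict[str, Any], slide_type: str) -> int:
--     """
--     Determine the best layout index for a given slide type
--
--     Args:
--         template_info: Template analysis results
--         slide_type: Type of slide (title, content, conclusion)
--
--     Returns:
--         Index of the best matching layout
--     """
--     layouts = template_info.get('slide_layouts', [])
--
--     if not layouts:
--         return 0
--
--     # Mapping preferences for slide types
--     layout_preferences = {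
--         'title': ['title', 'Title Slide', 'Title Only'],
--         'content': ['content', 'Title and Content', 'Two Content', 'Content with Caption'],
--         'conclusion': ['title', 'Title and Content', 'Title Only']
--     }
--
--     preferred_names = layout_preferences.get(slide_type, ['content'])
--
--     # Find best matching layout by name
--     for pref_name in preferred_names:
--         for i, layout in enumerate(layouts):
--             if pref_name.lower() in layout['name'].lower():
--                 return i
--
--     # Fallback: return first available layout or default
--     return 0 if layouts else 0
-- ===== SOURCE B (Python) =====
-- def get_best_layout_for_slide_type(template_info, slide_type):
--     layouts = template_info.get('slide_layouts', [])
--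
--     layout_preferences = {
--         'title': ['title', 'Title Slide', 'Title Only'],
--         'content': ['content', 'Title and Content', 'Two Content', 'Content with Caption'],
--         'conclusion': ['title', 'Title and Content', 'Title Only']
--     }
--     preferred_names = layout_preferences.get(slide_type, ['content'])
--
--     # Single argmin pass: rank of a layout = index of the first preferred name
--     # contained in its lowercased name (len(preferred_names) if none matches);
--     # keep the first layout with the strictly smallest rank, default index 0.
--     best_rank = len(preferred_names)
--     best_i = 0
--     for i, layout in enumerate(layouts):
--         name = layout['name'].lower()
--         r = next((k for k, p in enumerate(preferred_names) if p.lower() in name),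
--                  len(preferred_names))
--         if r < best_rank:
--             best_rank, best_i = r, i
--     return best_i
-- ===== Notes on version B (the rewrite author's own statement) =====
-- stated objective: alternative
-- what changed: Replaces the preference-major nested scan with early return by a single layout-major argmin pass that tracks the lexicographically smallest (preference-rank, index) pair.
-- outside the precondition, e.g. on get_best_layout_for_slide_type({'slide_layouts': [{'name': 'Title Slide'}, {}]}, 'title'): A returns 0, B raises KeyError
import Mathlib
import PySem

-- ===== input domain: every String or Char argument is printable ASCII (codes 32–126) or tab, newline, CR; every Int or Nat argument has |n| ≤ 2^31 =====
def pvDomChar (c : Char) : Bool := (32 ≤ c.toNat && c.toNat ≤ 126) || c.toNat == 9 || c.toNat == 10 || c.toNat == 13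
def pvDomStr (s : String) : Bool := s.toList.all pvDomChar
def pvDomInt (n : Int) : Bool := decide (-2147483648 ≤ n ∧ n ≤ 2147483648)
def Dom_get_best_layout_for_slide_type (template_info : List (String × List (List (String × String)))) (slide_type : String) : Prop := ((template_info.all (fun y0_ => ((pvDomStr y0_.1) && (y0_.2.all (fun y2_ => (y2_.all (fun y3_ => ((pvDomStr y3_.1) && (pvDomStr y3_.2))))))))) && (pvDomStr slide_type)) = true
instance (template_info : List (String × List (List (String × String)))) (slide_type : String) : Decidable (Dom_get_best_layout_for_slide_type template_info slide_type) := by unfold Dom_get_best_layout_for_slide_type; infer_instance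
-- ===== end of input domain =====

-- B replaces A's preference-major nested scan (early return on the first match) by a single
-- layout-major argmin pass over (preference-rank, index); alternative decomposition, same cost.

-- ===== PORT A =====
-- literal transliteration of A: empty check, then for each preferred name (in order)
-- scan the layouts and return the first index whose lowercased name contains it; else 0.
-- layout['name'] raises KeyError when the key is absent — Pre_ excludes that, getD "" stands in.
def get_best_layout_for_slide_type (template_info : List (String × List (List (String × String)))) (slide_type : String) : Int :=
  let layouts := (PySem.Dict.mk template_info).getD "slide_layouts" []
  if layouts = [] then 0
  else
    let layout_preferences := PySem.Dict.mk
      [("title", ["title", "Title Slide", "Title Only"]),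
       ("content", ["content", "Title and Content", "Two Content", "Content with Caption"]),
       ("conclusion", ["title", "Title and Content", "Title Only"])]
    let preferred_names := layout_preferences.getD slide_type ["content"]
    match preferred_names.findSome? (fun pref_name =>
        layouts.findIdx? (fun layout =>
          PySem.Str.isIn (PySem.Str.lower pref_name)
            (PySem.Str.lower ((PySem.Dict.mk layout).getD "name" "")))) with
    | some i => (i : Int)
    | none => 0

-- ===== PORT B =====
-- rank of a layout = index of the first preferred name contained in its lowercased name,
-- or preferred_names.length if none matches (the `next(..., len(preferred_names))` of Source B)
def pvRankB (preferred_names : List String) (layout : List (String × String)) : Nat :=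
  (preferred_names.findIdx? (fun p =>
      PySem.Str.isIn (PySem.Str.lower p)
        (PySem.Str.lower ((PySem.Dict.mk layout).getD "name" "")))).getD preferred_names.length

-- single enumerate pass keeping (best_rank, best_i), updated on strictly smaller rank
def get_best_layout_for_slide_type_alt (template_info : List (String × List (List (String × String)))) (slide_type : String) : Int :=
  let layouts := (PySem.Dict.mk template_info).getD "slide_layouts" []
  let layout_preferences := PySem.Dict.mk
    [("title", ["title", "Title Slide", "Title Only"]),
     ("content", ["content", "Title and Content", "Two Content", "Content with Caption"]),
     ("conclusion", ["title", "Title and Content", "Title Only"])]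
  let preferred_names := layout_preferences.getD slide_type ["content"]
  let best := layouts.zipIdx.foldl
    (fun (acc : Nat × Nat) li =>
      let r := pvRankB preferred_names li.1
      if r < acc.1 then (r, li.2) else acc)
    (preferred_names.length, 0)
  (best.2 : Int)

-- ===== PRECONDITION & SPEC =====
-- Pre_ excludes layout lists in which some layout lacks a 'name' key: there whether A returns or
-- raises KeyError depends on how far its preference-major scan gets, while B's full pass always raises.
def Pre_get_best_layout_for_slide_type (template_info : List (String × List (List (String × String)))) (slide_type : String) : Prop :=
  (((PySem.Dict.mk template_info).getD "slide_layouts" []).all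
    (fun layout => (PySem.Dict.mk layout).contains "name")) = true

instance (template_info : List (String × List (List (String × String)))) (slide_type : String) : Decidable (Pre_get_best_layout_for_slide_type template_info slide_type) := by unfold Pre_get_best_layout_for_slide_type; infer_instance

def pvWitness_get_best_layout_for_slide_type : (List (String × List (List (String × String)))) × String :=
  ([("slide_layouts", [[("name", "Regular")], [("name", "Title and Content")]])], "content")

def Spec_get_best_layout_for_slide_type (template_info : List (String × List (List (String × String)))) (slide_type : String) (out : Int) : Prop := out = get_best_layout_for_slide_type_alt template_info slide_type
instance (template_info : List (String × List (List (String × String)))) (slide_type : String) (out : Int) : Decidable (Spec_get_best_layout_for_slide_type template_info slide_type out) := by unfold Spec_get_best_layout_for_slide_type; infer_instance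

-- ===== CLAIM (what is proved, stated in full; the proofs are below) =====
def Claim_equal_get_best_layout_for_slide_type : Prop := ∀ (template_info : List (String × List (List (String × String)))) (slide_type : String), Dom_get_best_layout_for_slide_type template_info slide_type → Pre_get_best_layout_for_slide_type template_info slide_type → Spec_get_best_layout_for_slide_type template_info slide_type (get_best_layout_for_slide_type template_info slide_type)

-- ===== LEMMAS AND PROOFS =====

-- once the running best rank is 0 it can never be beaten (ranks are Nats)
theorem pv_foldl_best_zero {α : Type} (rank : α → Nat) (ys : List (α × Nat)) (bi : Nat) :
    ys.foldl (fun (acc : Nat × Nat) li =>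
      let r := rank li.1
      if r < acc.1 then (r, li.2) else acc) (0, bi) = (0, bi) := by
  induction ys with
  | nil => rfl
  | cons y ys ih => simpa using ih

-- if every rank in the list is one more than under `rank`, the whole fold shifts by one in the
-- rank component and picks the same index
theorem pv_foldl_shift {α : Type} (rank rank' : α → Nat) (ys : List (α × Nat))
    (h : ∀ li ∈ ys, rank' li.1 = rank li.1 + 1) (n bi : Nat) :
    ys.foldl (fun (acc : Nat × Nat) li =>
      let r := rank' li.1
      if r < acc.1 then (r, li.2) else acc) (n + 1, bi)
    = ((ys.foldl (fun (acc : Nat × Nat) li =>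
        let r := rank li.1
        if r < acc.1 then (r, li.2) else acc) (n, bi)).1 + 1,
       (ys.foldl (fun (acc : Nat × Nat) li =>
        let r := rank li.1
        if r < acc.1 then (r, li.2) else acc) (n, bi)).2) := by
  induction ys generalizing n bi with
  | nil => rfl
  | cons y ys ih =>
    have hy := h y (by simp)
    have hmem : ∀ li ∈ ys, rank' li.1 = rank li.1 + 1 := fun li hli => h li (by simp [hli])
    simp only [List.foldl_cons, hy]
    by_cases hlt : rank y.1 < n
    · rw [if_pos (by omega : rank y.1 + 1 < n + 1), if_pos hlt]
      exact ih hmem (rank y.1) y.2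
    · rw [if_neg (by omega : ¬ rank y.1 + 1 < n + 1), if_neg hlt]
      exact ih hmem n bi

-- the fold lands exactly on the first element satisfying q, when matching elements have rank 0,
-- non-matching ones rank ≥ 1, and the incoming best rank is ≥ 1
theorem pv_foldl_first_hit {α : Type} (q : α → Bool) (rank : α → Nat)
    (hr0 : ∀ l, q l = true → rank l = 0) (hr1 : ∀ l, q l = false → 1 ≤ rank l) :
    ∀ (xs : List α) (i n br bi), 1 ≤ br → xs.findIdx? q = some i →
    ((xs.zipIdx n).foldl (fun (acc : Nat × Nat) li =>
      let r := rank li.1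
      if r < acc.1 then (r, li.2) else acc) (br, bi)).2 = n + i := by
  intro xs
  induction xs with
  | nil => intro i n br bi _ hfind; simp at hfind
  | cons x xs ih =>
    intro i n br bi hbr hfind
    rw [List.findIdx?_cons] at hfind
    by_cases hq : q x = true
    · rw [if_pos hq] at hfind
      have hi : i = 0 := by simpa using hfind.symm
      subst hi
      simp only [List.zipIdx_cons, List.foldl_cons, hr0 x hq]
      rw [if_pos (by omega : 0 < br), pv_foldl_best_zero]
      simp
    · have hqx : q x = false := by simpa using hq
      rw [if_neg (by simp [hqx])] at hfind
      obtain ⟨i', hfi', hi⟩ := Option.map_eq_some_iff.mp hfind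
      have hrx := hr1 x hqx
      simp only [List.zipIdx_cons, List.foldl_cons]
      by_cases hlt : rank x < br
      · rw [if_pos hlt, ih i' (n+1) (rank x) n (by omega) hfi']
        omega
      · rw [if_neg hlt, ih i' (n+1) br bi hbr hfi']
        omega

-- main equivalence, abstract in the matching predicate: A's preference-major scan with early
-- return equals B's argmin fold
theorem pv_main {α : Type} (f : String → α → Bool) (xs : List α) :
    ∀ (prefs : List String),
    (match prefs.findSome? (fun p => xs.findIdx? (f p)) with
     | some i => (i : Int)
     | none => 0)
    = (((xs.zipIdx.foldl (fun (acc : Nat × Nat) li =>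
        let r := (prefs.findIdx? (fun q => f q li.1)).getD prefs.length
        if r < acc.1 then (r, li.2) else acc) (prefs.length, 0)).2 : Nat) : Int) := by
  intro prefs
  induction prefs with
  | nil =>
    simp only [List.findSome?_nil, List.findIdx?_nil, List.length_nil, Option.getD_none]
    rw [pv_foldl_best_zero (fun _ => (0 : Nat))]
    simp
  | cons p ps ih =>
    rw [List.findSome?_cons]
    rcases hfs : xs.findIdx? (f p) with _ | i
    · -- p matches no layout: every rank shifts by one, the fold picks the same index
      have hnone := List.findIdx?_eq_none_iff.mp hfs
      have hshift : ∀ li ∈ xs.zipIdx,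
          ((p :: ps).findIdx? (fun q => f q li.1)).getD (p :: ps).length
          = (ps.findIdx? (fun q => f q li.1)).getD ps.length + 1 := by
        intro li hli
        have hf : f p li.1 = false := hnone _ (List.fst_mem_of_mem_zipIdx hli)
        rw [List.findIdx?_cons, if_neg (by simp [hf])]
        rcases ps.findIdx? (fun q => f q li.1) with _ | k <;> simp
      simp only [List.length_cons] at hshift ⊢
      rw [pv_foldl_shift (fun l => (ps.findIdx? (fun q => f q l)).getD ps.length)
          (fun l => ((p :: ps).findIdx? (fun q => f q l)).getD (ps.length + 1))
          xs.zipIdx hshift ps.length 0]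
      exact ih
    · -- p first matches at index i: both sides return i
      have hr0 : ∀ l, f p l = true →
          (((p :: ps).findIdx? (fun q => f q l)).getD (p :: ps).length) = 0 := by
        intro l hl; rw [List.findIdx?_cons, if_pos hl]; rfl
      have hr1 : ∀ l, f p l = false →
          1 ≤ (((p :: ps).findIdx? (fun q => f q l)).getD (p :: ps).length) := by
        intro l hl
        rw [List.findIdx?_cons, if_neg (by simp [hl])]
        rcases ps.findIdx? (fun q => f q l) with _ | k <;> simp
      rw [pv_foldl_first_hit _ _ hr0 hr1 xs i 0 (p :: ps).length 0 (by simp) hfs]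
      simp

-- ===== VERDICT (by name: the statement is the Claim_ definition above) =====
theorem get_best_layout_for_slide_type_spec : Claim_equal_get_best_layout_for_slide_type := by
  intro template_info slide_type _ _
  unfold Spec_get_best_layout_for_slide_type
  unfold get_best_layout_for_slide_type get_best_layout_for_slide_type_alt
  simp only [pvRankB]
  by_cases hl : (PySem.Dict.mk template_info).getD "slide_layouts" [] = []
  · simp [hl]
  · rw [if_neg hl]
    exact pv_main
      (fun pref_name layout => PySem.Str.isIn (PySem.Str.lower pref_name)
        (PySem.Str.lower ((PySem.Dict.mk layout).getD "name" "")))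
      ((PySem.Dict.mk template_info).getD "slide_layouts" []) _
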